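-- pv_equiv track=rewrite | github.com/xdm2211/iceweasel | taskcluster/gecko_taskgraph/util/chunking.py | resolve_manifest_runtimes
-- ===== SOURCE A (Python) =====
-- def resolve_manifest_runtimes(all_runtimes, manifests):
--     """Match manifests to their runtimes, aggregating included sub-manifests.
--
--     Runtime data keys can be either "manifest.toml" for direct matches or
--     "manifest.toml:included.toml" for included sub-manifests. This function
--     aggregates both into a single runtime per parent manifest.
--
--     Args:
--         all_runtimes (dict): Raw runtime data from get_runtimes().
--         manifests (iterable): Manifest paths to look up.
--
--     Returns:
--         A dict mapping manifest paths to their total runtime in seconds.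
--         Manifests with no runtime data are omitted.
--     """
--     runtimes = {}
--     for manifest in manifests:
--         total_runtime = 0
--         found = False
--
--         if manifest in all_runtimes:
--             total_runtime += all_runtimes[manifest]
--             found = True
--
--         if manifest.endswith(".toml"):
--             prefix = manifest + ":"
--             for key, value in all_runtimes.items():
--                 if key.startswith(prefix):
--                     total_runtime += value
--                     found = True
--
--         if found:
--             runtimes[manifest] = total_runtime
--
--     return runtimes
-- ===== SOURCE B (Python) =====
-- def resolve_manifest_runtimes(all_runtimes, manifests):
--     # Inverted aggregation: one pass over all_runtimes builds a parent->total dict,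
--     # then a single lookup per manifest (A rescans all_runtimes for every manifest).
--     agg = {}
--     for key, value in all_runtimes.items():
--         agg[key] = agg.get(key, 0) + value
--         for i, ch in enumerate(key):
--             if ch == ":":
--                 p = key[:i]
--                 if p.endswith(".toml"):
--                     agg[p] = agg.get(p, 0) + value
--     return {m: agg[m] for m in manifests if m in agg}
-- ===== Notes on version B (the rewrite author's own statement) =====
-- stated objective: alternative
-- what changed: Instead of rescanning all runtime keys once per manifest, B makes a single pass over all_runtimes, crediting each key and every '.toml'-ending colon-prefix of it into an aggregation dict, then answers each manifest with one dict lookup.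
import Mathlib
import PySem

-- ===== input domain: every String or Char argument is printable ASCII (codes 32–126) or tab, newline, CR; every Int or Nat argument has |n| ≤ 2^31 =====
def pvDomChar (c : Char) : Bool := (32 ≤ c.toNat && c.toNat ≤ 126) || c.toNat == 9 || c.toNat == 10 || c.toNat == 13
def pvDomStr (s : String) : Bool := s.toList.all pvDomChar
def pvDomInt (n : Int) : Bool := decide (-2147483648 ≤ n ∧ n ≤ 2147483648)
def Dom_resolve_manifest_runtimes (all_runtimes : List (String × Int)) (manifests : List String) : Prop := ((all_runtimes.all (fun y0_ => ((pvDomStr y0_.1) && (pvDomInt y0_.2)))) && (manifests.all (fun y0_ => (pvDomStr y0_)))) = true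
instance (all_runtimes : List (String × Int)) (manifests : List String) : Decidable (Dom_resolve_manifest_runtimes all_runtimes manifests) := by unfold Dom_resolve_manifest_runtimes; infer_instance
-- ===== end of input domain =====

-- B inverts the aggregation: one pass over all_runtimes that credits each key and each
-- ".toml"-ending colon-prefix of it, then one dict lookup per manifest (alternative decomposition).

-- ===== PORT A =====
def resolve_manifest_runtimes (all_runtimes : List (String × Int)) (manifests : List String) : List (String × Int) :=
  let d := PySem.Dict.ofList all_runtimes
  (manifests.foldl (fun runtimes manifest =>
    -- total_runtime = 0; found = False; if manifest in all_runtimes: total += …; found = True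
    let s : Int × Bool :=
      match d.get? manifest with
      | some v => (0 + v, true)
      | none => (0, false)
    let s : Int × Bool :=
      if PySem.Str.endswith manifest ".toml" then
        d.items.foldl (fun (s : Int × Bool) kv =>
          if PySem.Str.startswith kv.1 (manifest ++ ":") then (s.1 + kv.2, true) else s) s
      else s
    if s.2 then runtimes.insert manifest s.1 else runtimes) PySem.Dict.empty).items

-- ===== PORT B =====
def resolve_manifest_runtimes_alt (all_runtimes : List (String × Int)) (manifests : List String) : List (String × Int) :=
  let d := PySem.Dict.ofList all_runtimes
  let agg := d.items.foldl (fun agg kv =>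
    let agg := agg.modify kv.1 0 (· + kv.2)
    (PySem.List.enumerate kv.1.toList 0).foldl (fun agg ic =>
      if ic.2 = ':' then
        let p := String.ofList (PySem.List.slice kv.1.toList none (some ic.1))
        if PySem.Str.endswith p ".toml" then agg.modify p 0 (· + kv.2) else agg
      else agg) agg) PySem.Dict.empty
  (manifests.foldl (fun r m =>
    match agg.get? m with
    | some v => r.insert m v
    | none => r) PySem.Dict.empty).items

-- ===== PRECONDITION & SPEC =====
def Spec_resolve_manifest_runtimes (all_runtimes : List (String × Int)) (manifests : List String) (out : List (String × Int)) : Prop := out = resolve_manifest_runtimes_alt all_runtimes manifests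
instance (all_runtimes : List (String × Int)) (manifests : List String) (out : List (String × Int)) : Decidable (Spec_resolve_manifest_runtimes all_runtimes manifests out) := by unfold Spec_resolve_manifest_runtimes; infer_instance

-- ===== CLAIM (what is proved, stated in full; the proofs are below) =====
def Claim_equal_resolve_manifest_runtimes : Prop := ∀ (all_runtimes : List (String × Int)) (manifests : List String), Dom_resolve_manifest_runtimes all_runtimes manifests → Spec_resolve_manifest_runtimes all_runtimes manifests (resolve_manifest_runtimes all_runtimes manifests)

-- ===== LEMMAS AND PROOFS =====


def pvHitOf (m : String) (kv : String × Int) : Bool :=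
  kv.1 == m || (PySem.Str.endswith m ".toml" && PySem.Str.startswith kv.1 (m ++ ":"))
def pvTotOf (m : String) (kv : String × Int) : Int :=
  (if kv.1 = m then kv.2 else 0) +
  (if PySem.Str.endswith m ".toml" = true ∧ PySem.Str.startswith kv.1 (m ++ ":") = true then kv.2 else 0)
def pvHit (m : String) (L : List (String × Int)) : Bool := L.any (pvHitOf m)
def pvTot (m : String) (L : List (String × Int)) : Int := (L.map (pvTotOf m)).sum

-- common reference form both ports are reduced to
def pvRef (L : List (String × Int)) (manifests : List String) : List (String × Int) :=
  (manifests.foldl (fun r m => if pvHit m L then r.insert m (pvTot m L) else r) PySem.Dict.empty).items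
def pvDSum (m : String) (L : List (String × Int)) : Int :=
  (L.map (fun kv => if kv.1 = m then kv.2 else 0)).sum
def pvDAny (m : String) (L : List (String × Int)) : Bool := L.any (fun kv => kv.1 == m)
def pvPSum (m : String) (L : List (String × Int)) : Int :=
  (L.map (fun kv => if PySem.Str.startswith kv.1 (m ++ ":") then kv.2 else 0)).sum
def pvPAny (m : String) (L : List (String × Int)) : Bool :=
  L.any (fun kv => PySem.Str.startswith kv.1 (m ++ ":"))

theorem pv_foldA (m : String) (L : List (String × Int)) (t : Int) (f : Bool) :
    L.foldl (fun (s : Int × Bool) kv =>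
        if PySem.Str.startswith kv.1 (m ++ ":") then (s.1 + kv.2, true) else s) (t, f)
      = (t + pvPSum m L, f || pvPAny m L) := by
  induction L generalizing t f with
  | nil => simp [pvPSum, pvPAny]
  | cons kv L ih =>
    simp only [List.foldl_cons, pvPSum, pvPAny, List.map_cons, List.sum_cons, List.any_cons]
    cases h : PySem.Str.startswith kv.1 (m ++ ":") with
    | true =>
      rw [if_pos rfl, ih]
      simp only [Prod.mk.injEq, if_pos rfl]
      exact ⟨by simp [pvPSum]; ring, by simp [pvPAny]⟩
    | false =>
      rw [if_neg (by simp), ih]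
      simp only [Prod.mk.injEq]
      exact ⟨by simp [pvPSum], by simp [pvPAny]⟩

theorem pv_dsum_zero (m : String) (L : List (String × Int)) (h : m ∉ L.map (·.1)) :
    pvDSum m L = 0 := by
  induction L with
  | nil => simp [pvDSum]
  | cons kv L ih =>
    simp only [List.map_cons, List.mem_cons] at h
    push_neg at h
    have := ih h.2
    simp only [pvDSum, List.map_cons, List.sum_cons] at this ⊢
    rw [if_neg (Ne.symm h.1), this]
    ring

theorem pv_dsum_single (m : String) (v : Int) (L : List (String × Int))
    (hnd : (L.map (·.1)).Nodup) (hm : (m, v) ∈ L) : pvDSum m L = v := by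
  induction L with
  | nil => simp at hm
  | cons kv L ih =>
    simp only [List.map_cons, List.nodup_cons] at hnd
    rcases List.mem_cons.mp hm with h | h
    · subst h
      have h0 := pv_dsum_zero m L hnd.1
      simp only [pvDSum, List.map_cons, List.sum_cons] at h0 ⊢
      rw [h0]
      simp
    · have hk : kv.1 ≠ m := by
        intro he
        exact hnd.1 (he ▸ (List.mem_map.mpr ⟨(m, v), h, rfl⟩))
      have := ih hnd.2 h
      simp only [pvDSum, List.map_cons, List.sum_cons] at this ⊢
      rw [if_neg hk, this]
      ring

theorem pv_dany_iff (m : String) (L : List (String × Int)) :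
    pvDAny m L = true ↔ m ∈ L.map (·.1) := by
  simp only [pvDAny, List.any_eq_true, List.mem_map, beq_iff_eq]


theorem pv_tot_split (m : String) (L : List (String × Int)) :
    pvTot m L = pvDSum m L +
      (if PySem.Str.endswith m ".toml" = true then pvPSum m L else 0) := by
  induction L with
  | nil => simp [pvTot, pvDSum, pvPSum]
  | cons kv L ih =>
    simp only [pvTot, pvDSum, pvPSum, List.map_cons, List.sum_cons, pvTotOf] at ih ⊢
    rw [ih]
    split_ifs <;> simp_all <;> ring

theorem pv_hit_split (m : String) (L : List (String × Int)) :
    pvHit m L = (pvDAny m L || (PySem.Str.endswith m ".toml" && pvPAny m L)) := by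
  induction L with
  | nil => simp [pvHit, pvDAny, pvPAny]
  | cons kv L ih =>
    simp only [pvHit, pvDAny, pvPAny, List.any_cons, pvHitOf] at ih ⊢
    rw [ih]
    cases kv.1 == m <;> cases PySem.Str.endswith m ".toml" <;>
      cases PySem.Str.startswith kv.1 (m ++ ":") <;> simp

def pvBodyA (d : PySem.Dict String Int) (runtimes : PySem.Dict String Int) (manifest : String) : PySem.Dict String Int :=
  let s : Int × Bool :=
    match d.get? manifest with
    | some v => (0 + v, true)
    | none => (0, false)
  let s : Int × Bool :=
    if PySem.Str.endswith manifest ".toml" then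
      d.items.foldl (fun (s : Int × Bool) kv =>
        if PySem.Str.startswith kv.1 (manifest ++ ":") then (s.1 + kv.2, true) else s) s
    else s
  if s.2 then runtimes.insert manifest s.1 else runtimes

theorem pv_stepA (d : PySem.Dict String Int) (hnd : d.keys.Nodup) (r : PySem.Dict String Int) (m : String) :
    pvBodyA d r m = if pvHit m d.items then r.insert m (pvTot m d.items) else r := by
  have hkeys : d.keys = d.items.map (·.1) := rfl
  have hbase : (match d.get? m with
      | some v => ((0:Int) + v, true)
      | none => ((0:Int), false)) = (pvDSum m d.items, pvDAny m d.items) := by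
    cases hg : d.get? m with
    | none =>
      have hnm : m ∉ d.keys := (PySem.Dict.get?_eq_none_iff_not_mem_keys ..).mp hg
      rw [hkeys] at hnm
      have h2 : pvDAny m d.items = false := by
        cases hc : pvDAny m d.items
        · rfl
        · exact absurd ((pv_dany_iff m d.items).mp hc) hnm
      rw [pv_dsum_zero m d.items hnm, h2]
    | some v =>
      have hmem : (m, v) ∈ d.items :=
        (PySem.Dict.get?_eq_some_iff_mem_items d m v hnd).mp hg
      have h1 : pvDSum m d.items = v :=
        pv_dsum_single m v d.items (hkeys ▸ hnd) hmem
      have h2 : pvDAny m d.items = true :=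
        (pv_dany_iff m d.items).mpr (List.mem_map.mpr ⟨(m, v), hmem, rfl⟩)
      rw [h1, h2]
      simp
  unfold pvBodyA
  dsimp only
  rw [hbase]
  cases he : PySem.Str.endswith m ".toml" with
  | true =>
    rw [if_pos (show (true = true) from rfl), pv_foldA, pv_tot_split, pv_hit_split, he]
    simp
  | false =>
    rw [if_neg (show ¬(false = true) by simp), pv_tot_split, pv_hit_split, he]
    cases hda : pvDAny m d.items <;> simp [hda]

theorem pv_outerA (d : PySem.Dict String Int) (hnd : d.keys.Nodup)
    (manifests : List String) (r : PySem.Dict String Int) :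
    manifests.foldl (pvBodyA d) r =
    manifests.foldl (fun r m => if pvHit m d.items then r.insert m (pvTot m d.items) else r) r := by
  induction manifests generalizing r with
  | nil => rfl
  | cons m ms ih =>
    simp only [List.foldl_cons]
    rw [pv_stepA d hnd r m, ih]

-- inner-colon predicate: entry (i,c) of enumerate(k) credits manifest m
def pvPmB (cs : List Char) (m : String) (ic : Int × Char) : Bool :=
  ic.2 == ':' && (String.ofList (PySem.List.slice cs none (some ic.1)) == m) &&
    PySem.Str.endswith m ".toml"

-- generic: pairwise-increasing firsts + all matches share one first ⇒ count is an indicator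
theorem pv_count_unique {α : Type} (P : Int × α → Bool) (n : Int) (l : List (Int × α))
    (hp : l.Pairwise (fun p q => p.1 < q.1)) (hu : ∀ x ∈ l, P x = true → x.1 = n) :
    l.countP P = if l.any P then 1 else 0 := by
  induction l with
  | nil => simp
  | cons x l ih =>
    rw [List.pairwise_cons] at hp
    cases hx : P x with
    | true =>
      have h0 : l.countP P = 0 := by
        rw [List.countP_eq_zero]
        intro y hy hPy
        have h1 := hu y (List.mem_cons_of_mem _ hy) hPy
        have h2 := hu x (List.mem_cons_self ..) hx
        have := hp.1 y hy
        omega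
      simp [List.countP_cons, List.any_cons, hx, h0]
    | false =>
      have := ih hp.2 (fun y hy => hu y (List.mem_cons_of_mem _ hy))
      simp only [List.countP_cons, List.any_cons, hx, this]
      cases l.any P <;> simp

-- (l ++ [c]) is a prefix of cs iff cs has c at position l.length after l
theorem pv_snoc_prefix_iff (l : List Char) (c : Char) (cs : List Char) :
    (l ++ [c]) <+: cs ↔ l.length < cs.length ∧ cs.take l.length = l ∧ cs[l.length]? = some c := by
  rw [List.prefix_iff_eq_take]
  constructor
  · intro h
    have hlen : l.length + 1 ≤ cs.length := by
      have := congrArg List.length h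
      simp only [List.length_append, List.length_singleton, List.length_take] at this
      omega
    simp only [List.length_append, List.length_singleton] at h
    rw [List.take_add_one] at h
    have hgt : cs[l.length]?.isSome := by
      simp [List.getElem?_eq_getElem (show l.length < cs.length by omega)]
    obtain ⟨c', hc'⟩ := Option.isSome_iff_exists.mp hgt
    rw [hc'] at h
    simp only [Option.toList_some] at h
    have h1 : l = cs.take l.length ∧ [c] = [c'] := by
      apply List.append_inj h
      simp only [List.length_take]; omega
    refine ⟨by omega, h1.1.symm, by rw [hc']; simpa using h1.2.symm⟩
  · rintro ⟨h1, h2, h3⟩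
    simp only [List.length_append, List.length_singleton]
    rw [List.take_add_one, h3, h2]
    simp

theorem pv_ofList_eq_iff (l : List Char) (m : String) : String.ofList l = m ↔ l = m.toList := by
  constructor
  · rintro rfl; simp
  · intro h; subst h; simp

theorem pv_toList_append_colon (m : String) : (m ++ ":").toList = m.toList ++ [':'] := by
  simp

theorem pv_sw_iff (k m : String) :
    PySem.Str.startswith k (m ++ ":") = true ↔
      m.toList.length < k.toList.length ∧ k.toList.take m.toList.length = m.toList ∧
        k.toList[m.toList.length]? = some ':' := by
  rw [PySem.Str.startswith_eq, PySem.Chars.startswith_iff, pv_toList_append_colon,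
    pv_snoc_prefix_iff]

theorem pv_mem_imp (cs : List Char) (m : String) (x : Int × Char)
    (hx : x ∈ PySem.List.enumerate cs 0) (hP : pvPmB cs m x = true) :
    x.1 = (m.toList.length : Int) ∧ (m.toList.length < cs.length ∧
      cs.take m.toList.length = m.toList ∧ cs[m.toList.length]? = some ':') ∧
      PySem.Str.endswith m ".toml" = true := by
  obtain ⟨j, hj, rfl⟩ := (PySem.List.mem_enumerate_iff ..).mp hx
  simp only [pvPmB, zero_add, Bool.and_eq_true, beq_iff_eq] at hP
  obtain ⟨⟨hc, hsl⟩, hew⟩ := hP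
  rw [PySem.List.slice_to_natCast, pv_ofList_eq_iff] at hsl
  have hlen : m.toList.length = j := by
    have := congrArg List.length hsl
    simp only [List.length_take] at this
    omega
  subst hlen
  refine ⟨by simp, ⟨hj, hsl, ?_⟩, hew⟩
  rw [List.getElem?_eq_getElem hj, hc]

theorem pv_any_enum (k m : String) :
    (PySem.List.enumerate k.toList 0).any (pvPmB k.toList m) =
      (PySem.Str.endswith m ".toml" && PySem.Str.startswith k (m ++ ":")) := by
  rw [Bool.eq_iff_iff]
  simp only [List.any_eq_true, Bool.and_eq_true]
  constructor
  · rintro ⟨x, hx, hP⟩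
    obtain ⟨_, hpre, hew⟩ := pv_mem_imp k.toList m x hx hP
    exact ⟨hew, (pv_sw_iff k m).mpr hpre⟩
  · rintro ⟨hew, hsw⟩
    obtain ⟨hlt, htake, hget⟩ := (pv_sw_iff k m).mp hsw
    refine ⟨((m.toList.length : Int), k.toList[m.toList.length]), ?_, ?_⟩
    · exact (PySem.List.mem_enumerate_iff ..).mpr ⟨m.toList.length, hlt, by simp⟩
    · simp only [pvPmB, Bool.and_eq_true, beq_iff_eq]
      refine ⟨⟨?_, ?_⟩, hew⟩
      · have := List.getElem?_eq_getElem hlt ▸ hget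
        simpa using this
      · rw [PySem.List.slice_to_natCast, pv_ofList_eq_iff]
        exact htake

theorem pv_count_enum (k m : String) :
    ((PySem.List.enumerate k.toList 0).countP (pvPmB k.toList m) : Int) =
      (if PySem.Str.endswith m ".toml" = true ∧ PySem.Str.startswith k (m ++ ":") = true
        then 1 else 0) := by
  rw [pv_count_unique (pvPmB k.toList m) (m.toList.length : Int) _
    (PySem.List.pairwise_lt_enumerate ..)
    (fun x hx hP => (pv_mem_imp k.toList m x hx hP).1), pv_any_enum]
  by_cases h : PySem.Str.endswith m ".toml" = true ∧ PySem.Str.startswith k (m ++ ":") = true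
  · rw [if_pos h, if_pos ?_]
    · simp
    · rw [Bool.and_eq_true]
      exact h
  · rw [if_neg h, if_neg ?_]
    · simp
    · intro hc
      rw [Bool.and_eq_true] at hc
      exact h ⟨hc.1, hc.2⟩

def pvBodyB (k : String) (v : Int) (agg : PySem.Dict String Int) (ic : Int × Char) : PySem.Dict String Int :=
  if ic.2 = ':' then
    let p := String.ofList (PySem.List.slice k.toList none (some ic.1))
    if PySem.Str.endswith p ".toml" then agg.modify p 0 (· + v) else agg
  else agg

theorem pv_bodyB_getD (k : String) (v : Int) (agg : PySem.Dict String Int)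
    (ic : Int × Char) (m : String) :
    (pvBodyB k v agg ic).getD m 0 =
      agg.getD m 0 + v * (if pvPmB k.toList m ic then 1 else 0) := by
  unfold pvBodyB
  by_cases hc : ic.2 = ':'
  · rw [if_pos hc]
    by_cases hew : PySem.Str.endswith (String.ofList (PySem.List.slice k.toList none (some ic.1))) ".toml" = true
    · rw [if_pos hew, PySem.Dict.getD_modify]
      by_cases hpm : String.ofList (PySem.List.slice k.toList none (some ic.1)) = m
      · have hP : pvPmB k.toList m ic = true := by
          simp only [pvPmB, Bool.and_eq_true, beq_iff_eq]
          exact ⟨⟨hc, hpm⟩, hpm ▸ hew⟩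
        rw [if_pos hpm.symm, hP, hpm]
        simp
      · have hP : pvPmB k.toList m ic = false := by
          simp [pvPmB, hpm]
        rw [if_neg (fun h => hpm h.symm), hP]
        simp
    · have hP : pvPmB k.toList m ic = false := by
        by_cases hpm : String.ofList (PySem.List.slice k.toList none (some ic.1)) = m
        · have hewm : PySem.Str.endswith m ".toml" = false := by
            rw [← hpm]; exact eq_false_of_ne_true hew
          unfold pvPmB; rw [hewm]; simp
        · simp [pvPmB, hpm]
      rw [if_neg hew, hP]
      simp
  · have hP : pvPmB k.toList m ic = false := by simp [pvPmB, hc]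
    rw [if_neg hc, hP]
    simp

theorem pv_bodyB_contains (k : String) (v : Int) (agg : PySem.Dict String Int)
    (ic : Int × Char) (m : String) :
    (pvBodyB k v agg ic).contains m = (agg.contains m || pvPmB k.toList m ic) := by
  unfold pvBodyB
  by_cases hc : ic.2 = ':'
  · rw [if_pos hc]
    by_cases hew : PySem.Str.endswith (String.ofList (PySem.List.slice k.toList none (some ic.1))) ".toml" = true
    · rw [if_pos hew, PySem.Dict.contains_modify]
      by_cases hpm : String.ofList (PySem.List.slice k.toList none (some ic.1)) = m
      · have hP : pvPmB k.toList m ic = true := by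
          simp only [pvPmB, Bool.and_eq_true, beq_iff_eq]
          exact ⟨⟨hc, hpm⟩, hpm ▸ hew⟩
        rw [hP, hpm]
        simp
      · have hP : pvPmB k.toList m ic = false := by
          simp [pvPmB, hpm]
        rw [hP]
        have : (m == String.ofList (PySem.List.slice k.toList none (some ic.1))) = false := by
          simp [beq_iff_eq]
          exact fun h => hpm h.symm
        rw [this]
        simp
    · have hP : pvPmB k.toList m ic = false := by
        by_cases hpm : String.ofList (PySem.List.slice k.toList none (some ic.1)) = m
        · have hewm : PySem.Str.endswith m ".toml" = false := by
            rw [← hpm]; exact eq_false_of_ne_true hew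
          unfold pvPmB; rw [hewm]; simp
        · simp [pvPmB, hpm]
      rw [if_neg hew, hP]
      simp
  · have hP : pvPmB k.toList m ic = false := by simp [pvPmB, hc]
    rw [if_neg hc, hP]
    simp

theorem pv_innerB_getD (k : String) (v : Int) (m : String) (l : List (Int × Char))
    (agg : PySem.Dict String Int) :
    (l.foldl (pvBodyB k v) agg).getD m 0 =
      agg.getD m 0 + v * (l.countP (pvPmB k.toList m) : Int) := by
  induction l generalizing agg with
  | nil => simp
  | cons ic l ih =>
    rw [List.foldl_cons, ih, pv_bodyB_getD, List.countP_cons]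
    cases h : pvPmB k.toList m ic <;> simp [h] <;> push_cast <;> ring

theorem pv_innerB_contains (k : String) (v : Int) (m : String) (l : List (Int × Char))
    (agg : PySem.Dict String Int) :
    (l.foldl (pvBodyB k v) agg).contains m =
      (agg.contains m || l.any (pvPmB k.toList m)) := by
  induction l generalizing agg with
  | nil => simp
  | cons ic l ih =>
    rw [List.foldl_cons, ih, pv_bodyB_contains, List.any_cons]
    cases h : pvPmB k.toList m ic <;> simp [h]

def pvStepB (agg : PySem.Dict String Int) (kv : String × Int) : PySem.Dict String Int :=
  (PySem.List.enumerate kv.1.toList 0).foldl (pvBodyB kv.1 kv.2) (agg.modify kv.1 0 (· + kv.2))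

theorem pv_stepB_getD (agg : PySem.Dict String Int) (kv : String × Int) (m : String) :
    (pvStepB agg kv).getD m 0 = agg.getD m 0 + pvTotOf m kv := by
  unfold pvStepB
  rw [pv_innerB_getD, pv_count_enum, PySem.Dict.getD_modify, pvTotOf]
  split_ifs with h1 h2 h3 h4 h5 <;> try ring
  all_goals simp_all
  all_goals ring

theorem pv_stepB_contains (agg : PySem.Dict String Int) (kv : String × Int) (m : String) :
    (pvStepB agg kv).contains m = (agg.contains m || pvHitOf m kv) := by
  unfold pvStepB
  rw [pv_innerB_contains, pv_any_enum, PySem.Dict.contains_modify, pvHitOf]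
  by_cases h1 : m = kv.1
  · rw [h1]
    simp
  · have ha : (m == kv.1) = false := by simp [h1]
    have hb : (kv.1 == m) = false := by
      simp only [beq_eq_false_iff_ne, ne_eq]
      exact fun h => h1 h.symm
    rw [ha, hb]
    simp

theorem pv_aggB_getD (L : List (String × Int)) (agg : PySem.Dict String Int) (m : String) :
    (L.foldl pvStepB agg).getD m 0 = agg.getD m 0 + pvTot m L := by
  induction L generalizing agg with
  | nil => simp [pvTot]
  | cons kv L ih =>
    rw [List.foldl_cons, ih, pv_stepB_getD]
    simp only [pvTot, List.map_cons, List.sum_cons]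
    ring

theorem pv_aggB_contains (L : List (String × Int)) (agg : PySem.Dict String Int) (m : String) :
    (L.foldl pvStepB agg).contains m = (agg.contains m || pvHit m L) := by
  induction L generalizing agg with
  | nil => simp [pvHit]
  | cons kv L ih =>
    rw [List.foldl_cons, ih, pv_stepB_contains]
    simp only [pvHit, List.any_cons]
    cases agg.contains m <;> cases pvHitOf m kv <;> simp

theorem pv_get?_char (d : PySem.Dict String Int) (k : String) :
    d.get? k = if d.contains k then some (d.getD k 0) else none := by
  rw [PySem.Dict.contains_eq_isSome_get?, PySem.Dict.getD_eq_get?_getD]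
  cases d.get? k <;> simp

theorem pv_aggB_get? (L : List (String × Int)) (m : String) :
    (L.foldl pvStepB PySem.Dict.empty).get? m =
      if pvHit m L then some (pvTot m L) else none := by
  rw [pv_get?_char, pv_aggB_contains, pv_aggB_getD]
  simp

theorem pv_outerB (L : List (String × Int)) (manifests : List String)
    (r : PySem.Dict String Int) :
    manifests.foldl (fun r m =>
        match (L.foldl pvStepB PySem.Dict.empty).get? m with
        | some v => r.insert m v
        | none => r) r =
      manifests.foldl (fun r m => if pvHit m L then r.insert m (pvTot m L) else r) r := by
  induction manifests generalizing r with
  | nil => rfl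
  | cons m ms ih =>
    simp only [List.foldl_cons]
    rw [pv_aggB_get?]
    cases h : pvHit m L with
    | true => exact ih _
    | false => exact ih _


theorem pv_portA_eq_ref (all_runtimes : List (String × Int)) (manifests : List String) :
    resolve_manifest_runtimes all_runtimes manifests =
    pvRef (PySem.Dict.ofList all_runtimes).items manifests :=
  congrArg PySem.Dict.items
    (pv_outerA (PySem.Dict.ofList all_runtimes) (PySem.Dict.nodup_keys_ofList ..)
      manifests PySem.Dict.empty)

theorem pv_portB_eq_ref (all_runtimes : List (String × Int)) (manifests : List String) :
    resolve_manifest_runtimes_alt all_runtimes manifests =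
    pvRef (PySem.Dict.ofList all_runtimes).items manifests :=
  congrArg PySem.Dict.items
    (pv_outerB (PySem.Dict.ofList all_runtimes).items manifests PySem.Dict.empty)

-- ===== VERDICT (by name: the statement is the Claim_ definition above) =====
theorem resolve_manifest_runtimes_spec : Claim_equal_resolve_manifest_runtimes := by
  intro all_runtimes manifests _
  unfold Spec_resolve_manifest_runtimes
  rw [pv_portA_eq_ref, pv_portB_eq_ref]
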